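-- pv_equiv track=rewrite | github.com/myemail4ik/main | main.py | ps_automatick_bomb
-- ===== SOURCE A (Python) =====
-- def ps_automatick_bomb(random_cell):
--     map_point = ([[1, 2, 3, 4],
--                   [5, 6, 7, 8],
--                   [9, 10, 11, 12],
--                   [13, 14, 15, 16]])
--
--     for j in range(int(len(map_point))):
--         for g in range(int(len(map_point[j]))):
--             if random_cell== map_point[j][g] and map_point[j][g] != 0:
--                 point=[g,j]
--                 return point
-- ===== SOURCE B (Python) =====
-- def ps_automatick_bomb(random_cell):
--     flat = list(range(1, 17))
--     if random_cell in flat: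
--         idx = flat.index(random_cell)
--         return [idx % 4, idx // 4]
-- ===== Notes on version B (the rewrite author's own statement) =====
-- stated objective: simpler
-- what changed: Replaces the nested row/column scan of a 4x4 grid literal with a single flattened range lookup plus arithmetic recovery of the coordinates (idx % 4, idx // 4).
import Mathlib
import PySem

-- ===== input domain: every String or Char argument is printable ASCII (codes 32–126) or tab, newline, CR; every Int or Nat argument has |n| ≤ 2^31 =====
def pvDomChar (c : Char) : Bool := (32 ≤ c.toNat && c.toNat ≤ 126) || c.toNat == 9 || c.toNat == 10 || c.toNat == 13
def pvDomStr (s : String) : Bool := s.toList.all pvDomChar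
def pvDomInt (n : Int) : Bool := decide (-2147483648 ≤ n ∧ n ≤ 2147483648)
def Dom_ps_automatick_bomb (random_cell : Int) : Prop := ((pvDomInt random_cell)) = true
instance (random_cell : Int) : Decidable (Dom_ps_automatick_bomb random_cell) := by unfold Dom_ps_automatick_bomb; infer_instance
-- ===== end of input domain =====

-- B replaces the nested 4x4 grid scan with a flat range(1,17) lookup and % / // coordinate arithmetic (simpler).


-- ===== PORT A =====
-- Port of A: nested for-loops over range(len(...)) with early return, via Option folds.
def ps_automatick_bomb (random_cell : Int) : Option (List Int) :=
  let map_point : List (List Int) :=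
    [[1, 2, 3, 4], [5, 6, 7, 8], [9, 10, 11, 12], [13, 14, 15, 16]]
  (PySem.List.pyRange 0 (Int.ofNat map_point.length) 1).foldl (fun acc j =>
    match acc with
    | some r => some r
    | none =>
      let row := (PySem.List.pyGet? map_point j).getD []
      (PySem.List.pyRange 0 (Int.ofNat row.length) 1).foldl (fun acc2 g =>
        match acc2 with
        | some r => some r
        | none =>
          let v := (PySem.List.pyGet? row g).getD 0
          if random_cell = v ∧ v ≠ 0 then some [g, j] else none) none) none

-- ===== PORT B =====
-- Port of B: flat = list(range(1,17)); membership + index, coordinates by % and //.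
def ps_automatick_bomb_alt (random_cell : Int) : Option (List Int) :=
  let flat : List Int := PySem.List.pyRange 1 17 1
  if flat.contains random_cell then
    match PySem.List.index? flat random_cell with
    | some idx => some [PySem.Int.mod idx 4, PySem.Int.floordiv idx 4]
    | none => none
  else none

-- ===== PRECONDITION & SPEC =====
def Spec_ps_automatick_bomb (random_cell : Int) (out : Option (List Int)) : Prop := out = ps_automatick_bomb_alt random_cell
instance (random_cell : Int) (out : Option (List Int)) : Decidable (Spec_ps_automatick_bomb random_cell out) := by unfold Spec_ps_automatick_bomb; infer_instance

-- ===== CLAIM (what is proved, stated in full; the proofs are below) =====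
def Claim_equal_ps_automatick_bomb : Prop := ∀ (random_cell : Int), Dom_ps_automatick_bomb random_cell → Spec_ps_automatick_bomb random_cell (ps_automatick_bomb random_cell)

-- ===== LEMMAS AND PROOFS =====

-- helper: a foldl with early-return shape stays none when every step from none yields none
theorem pvFoldlNone {a b : Type} (f : Option b → a → Option b) (l : List a)
    (hn : ∀ x ∈ l, f none x = none) : l.foldl f none = none := by
  induction l with
  | nil => rfl
  | cons x xs ih =>
    simp only [List.foldl_cons, hn x (by simp)]
    exact ih (fun y hy => hn y (by simp [hy]))

-- ===== VERDICT (by name: the statement is the Claim_ definition above) =====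
theorem ps_automatick_bomb_spec : Claim_equal_ps_automatick_bomb := by
  intro rc _
  unfold Spec_ps_automatick_bomb
  by_cases h : 1 ≤ rc ∧ rc ≤ 16
  · obtain ⟨h1, h2⟩ := h
    interval_cases rc <;> decide
  · have hA : ps_automatick_bomb rc = none := by
      have hr : ∀ j ∈ ([0,1,2,3] : List Int),
          PySem.List.pyRange 0 (Int.ofNat ((PySem.List.pyGet? ([[1,2,3,4],[5,6,7,8],[9,10,11,12],[13,14,15,16]] : List (List Int)) j).getD []).length) 1 = [0,1,2,3] := by decide
      have hv : ∀ j ∈ ([0,1,2,3] : List Int), ∀ g ∈ ([0,1,2,3] : List Int),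
          (PySem.List.pyGet? ((PySem.List.pyGet? ([[1,2,3,4],[5,6,7,8],[9,10,11,12],[13,14,15,16]] : List (List Int)) j).getD []) g).getD 0 = 4 * j + g + 1 := by decide
      unfold ps_automatick_bomb
      simp only []
      rw [show PySem.List.pyRange 0 (Int.ofNat ([[1,2,3,4],[5,6,7,8],[9,10,11,12],[13,14,15,16]] : List (List Int)).length) 1 = [0,1,2,3] from by decide]
      refine pvFoldlNone _ _ ?_
      intro j hj
      simp only []
      rw [hr j hj]
      refine pvFoldlNone _ _ ?_
      intro g hg
      simp only []
      rw [hv j hj g hg]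
      refine if_neg ?_
      rintro ⟨h1, -⟩
      simp only [List.mem_cons, List.not_mem_nil, or_false] at hj hg
      omega
    have hB : ps_automatick_bomb_alt rc = none := by
      unfold ps_automatick_bomb_alt
      rw [show (PySem.List.pyRange 1 17 1 : List Int) = [1,2,3,4,5,6,7,8,9,10,11,12,13,14,15,16] from by decide]
      have hc : (([1,2,3,4,5,6,7,8,9,10,11,12,13,14,15,16] : List Int).contains rc) = false := by
        simp only [List.contains_eq_mem, decide_eq_false_iff_not, List.mem_cons, List.not_mem_nil, or_false]
        omega
      simp only [hc, Bool.false_eq_true, if_false]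
    rw [hA, hB]
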